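-- pv_equiv track=rewrite | github.com/bensenberner/ctci | dynamic_recursive/powerset.py | makeSets
-- ===== SOURCE A (Python) =====
-- def makeSets(arr):
--     arr = sorted(arr)
--     # will contain all subsets. eventually grows to size 2^n
--     sets = [[]]
--     for num in arr:
--         # lock the length before we start growing sets
--         subsetLen = len(sets)
--         for i in range(subsetLen):
--             newSet = sets[i] + [num]
--
--             # since it's a sorted list, we can check for duplicate lists
--             sets.append(newSet) if newSet not in sets else None
--
--     return sets
-- ===== SOURCE B (Python) =====
-- def makeSets(arr):
--     s = sorted(arr)
--     result = [[]]
--     i = 0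
--     n = len(s)
--     while i < n:
--         v = s[i]
--         j = i
--         while j < n and s[j] == v:
--             j += 1
--         count = j - i
--         result = [sub + [v] * k for k in range(count + 1) for sub in result]
--         i = j
--     return result
-- ===== Notes on version B (the rewrite author's own statement) =====
-- stated objective: simpler
-- what changed: Instead of testing every candidate subset for membership in the growing result list, B run-length-groups the sorted input and extends each subset with 0..count copies of each distinct value, so no duplicate can ever arise and the membership scan disappears.
import Mathlib
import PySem

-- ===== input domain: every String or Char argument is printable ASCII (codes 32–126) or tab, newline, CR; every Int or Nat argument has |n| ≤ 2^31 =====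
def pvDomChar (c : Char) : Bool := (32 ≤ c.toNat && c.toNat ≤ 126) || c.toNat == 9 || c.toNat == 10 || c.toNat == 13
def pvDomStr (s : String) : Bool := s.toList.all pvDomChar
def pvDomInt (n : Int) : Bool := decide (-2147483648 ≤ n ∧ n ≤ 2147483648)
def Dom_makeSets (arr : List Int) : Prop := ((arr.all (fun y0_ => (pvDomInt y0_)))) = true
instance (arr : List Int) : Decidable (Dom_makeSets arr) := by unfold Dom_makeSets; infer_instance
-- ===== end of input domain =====

-- B replaces A's per-candidate membership scan by run-length grouping of the sorted input
-- (multiplicities make duplicates impossible), a simpler construction; equivalence is proved on all inputs.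

-- ===== PORT A =====
-- inner 'for i in range(subsetLen)' loop of A: index i runs from 0 to n-1, state 'sets' grows
def innerLoop (v : Int) (n : Nat) (i : Nat) (sets : List (List Int)) : List (List Int) :=
  if _h : i < n then
    let sets' :=
      match PySem.List.pyGet? sets (i : Int) with
      | some x => if (x ++ [v]) ∈ sets then sets else sets ++ [x ++ [v]]
      | none => sets
    innerLoop v n (i + 1) sets'
  else sets
termination_by n - i

def makeSets (arr : List Int) : List (List Int) :=
  (PySem.List.sorted arr (fun x => x) false).foldl
    (fun sets num => innerLoop num sets.length 0 sets) [[]]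

-- ===== PORT B =====
-- Source B's while-loop: consume one run (value v with its count) per step, rebuild result
def altGo (res : List (List Int)) (l : List Int) : List (List Int) :=
  match l with
  | [] => res
  | v :: rest =>
    let c : Nat := 1 + (rest.takeWhile (· == v)).length
    let res' := (PySem.List.pyRange 0 ((c : Int) + 1) 1).foldl
      (fun acc k => acc ++ res.map (fun sub => sub ++ List.replicate k.toNat v)) []
    altGo res' (rest.dropWhile (· == v))
termination_by l.length
decreasing_by
  have := List.length_dropWhile_le (p := (· == v)) (l := rest)
  simp only [List.length_cons]; omega

def makeSets_alt (arr : List Int) : List (List Int) :=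
  altGo [[]] (PySem.List.sorted arr (fun x => x) false)

-- ===== PRECONDITION & SPEC =====
def Spec_makeSets (arr : List Int) (out : List (List Int)) : Prop := out = makeSets_alt arr
instance (arr : List Int) (out : List (List Int)) : Decidable (Spec_makeSets arr out) := by unfold Spec_makeSets; infer_instance

-- ===== CLAIM (what is proved, stated in full; the proofs are below) =====
def Claim_equal_makeSets : Prop := ∀ (arr : List Int), Dom_makeSets arr → Spec_makeSets arr (makeSets arr)

-- ===== LEMMAS AND PROOFS =====

-- The intermediate state after processing j copies of v starting from 'st':
-- all subsets of st extended by k copies of v, for k = 0..j, k slowest-varying.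
def blockS (st : List (List Int)) (v : Int) (k : Nat) : List (List Int) :=
  st.map (· ++ List.replicate k v)

def stateS (st : List (List Int)) (v : Int) (j : Nat) : List (List Int) :=
  (List.range (j + 1)).flatMap (blockS st v)

lemma stateS_zero (st : List (List Int)) (v : Int) : stateS st v 0 = st := by
  simp [stateS, blockS]

lemma stateS_succ (st : List (List Int)) (v : Int) (j : Nat) :
    stateS st v (j + 1) = stateS st v j ++ blockS st v (j + 1) := by
  simp [stateS, List.range_succ]

lemma mem_blockS {st : List (List Int)} {v : Int} {k : Nat} {x : List Int} :
    x ∈ blockS st v k ↔ ∃ t ∈ st, x = t ++ List.replicate k v := by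
  simp [blockS, eq_comm]

lemma mem_stateS {st : List (List Int)} {v : Int} {j : Nat} {x : List Int} :
    x ∈ stateS st v j ↔ ∃ k ≤ j, ∃ t ∈ st, x = t ++ List.replicate k v := by
  simp [stateS, mem_blockS]

lemma count_of_mem_blockS {st : List (List Int)} {v : Int} {k : Nat} {x : List Int}
    (hv : ∀ t ∈ st, v ∉ t) (hx : x ∈ blockS st v k) : x.count v = k := by
  rcases mem_blockS.mp hx with ⟨t, ht, rfl⟩
  simp [List.count_append, List.count_eq_zero.mpr (hv t ht)]

lemma count_le_of_mem_stateS {st : List (List Int)} {v : Int} {j : Nat} {x : List Int}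
    (hv : ∀ t ∈ st, v ∉ t) (hx : x ∈ stateS st v j) : x.count v ≤ j := by
  rcases mem_stateS.mp hx with ⟨k, hk, t, ht, rfl⟩
  simp [List.count_append, List.count_eq_zero.mpr (hv t ht)]
  omega

lemma nodup_blockS {st : List (List Int)} (v : Int) (k : Nat) (hnd : st.Nodup) :
    (blockS st v k).Nodup :=
  hnd.map (List.append_left_injective _)

lemma nodup_stateS {st : List (List Int)} {v : Int} (j : Nat)
    (hnd : st.Nodup) (hv : ∀ t ∈ st, v ∉ t) : (stateS st v j).Nodup := by
  induction j with
  | zero => simpa [stateS_zero] using hnd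
  | succ j ih =>
    rw [stateS_succ]
    refine ih.append (nodup_blockS v (j + 1) hnd) ?_
    intro x hx hx'
    have h1 := count_le_of_mem_stateS hv hx
    have h2 := count_of_mem_blockS hv hx'
    omega

-- skip phase: while every inspected candidate is already present, the state does not change
lemma innerLoop_skip (v : Int) (st : List (List Int)) (i m : Nat)
    (him : i ≤ m) (hm : m ≤ st.length)
    (h : ∀ j, i ≤ j → j < m → ∀ hj : j < st.length, st[j] ++ [v] ∈ st) :
    innerLoop v st.length i st = innerLoop v st.length m st := by
  induction hmi : m - i generalizing i with
  | zero =>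
    have : i = m := by omega
    subst this; rfl
  | succ n ih =>
    have hi : i < st.length := by omega
    rw [innerLoop, dif_pos hi]
    have hget : PySem.List.pyGet? st (i : Int) = some st[i] := by
      simp [PySem.List.pyGet?, PySem.List.pyIdx?, hi]
    rw [hget]
    simp only [if_pos (h i le_rfl (by omega) hi)]
    exact ih (i + 1) (by omega) (fun j h1 h2 hj => h j (by omega) h2 hj) (by omega)

-- append phase: all remaining candidates are fresh and pairwise distinct, so each is appended
lemma innerLoop_append (v : Int) (S T : List (List Int)) (i : Nat)
    (hnew : ∀ j, i ≤ j → ∀ hj : j < S.length, S[j] ++ [v] ∉ S ++ T)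
    (hnd : ((S.drop i).map (· ++ [v])).Nodup) :
    innerLoop v S.length i (S ++ T) = S ++ T ++ (S.drop i).map (· ++ [v]) := by
  induction hmi : S.length - i generalizing i T with
  | zero =>
    have hi : S.length ≤ i := by omega
    rw [innerLoop, dif_neg (by omega), List.drop_eq_nil_of_le hi]
    simp
  | succ n ih =>
    have hi : i < S.length := by omega
    rw [innerLoop, dif_pos hi]
    have hget : PySem.List.pyGet? (S ++ T) (i : Int) = some S[i] := by
      rw [PySem.List.pyGet?_natCast, List.getElem?_append_left hi,
        List.getElem?_eq_getElem hi]
    rw [hget]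
    simp only [if_neg (hnew i le_rfl hi)]
    have hdrop : S.drop i = S[i] :: S.drop (i + 1) := List.drop_eq_getElem_cons hi
    rw [hdrop] at hnd
    simp only [List.map_cons, List.nodup_cons] at hnd
    have step : (S ++ T) ++ [S[i] ++ [v]] = S ++ (T ++ [S[i] ++ [v]]) := by
      simp [List.append_assoc]
    rw [step, ih (T ++ [S[i] ++ [v]]) (i + 1) ?_ hnd.2 (by omega)]
    · rw [hdrop, List.map_cons]
      simp only [List.append_assoc, List.cons_append, List.nil_append]
    · intro j hij hj hcon
      have hmemS : S[j] ++ [v] ∉ S ++ T := hnew j (by omega) hj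
      rcases List.mem_append.mp hcon with h | h
      · exact hmemS (List.mem_append_left _ h)
      · rcases List.mem_append.mp h with h2 | h2
        · exact hmemS (List.mem_append_right _ h2)
        · have heq : S[j] ++ [v] = S[i] ++ [v] := List.mem_singleton.mp h2
          apply hnd.1
          have hjmem : S[j] ∈ S.drop (i + 1) := by
            have hj2 : j - (i + 1) < (S.drop (i + 1)).length := by
              simp [List.length_drop]; omega
            have hg : (S.drop (i + 1))[j - (i + 1)] = S[j] := by
              rw [List.getElem_drop]; congr 1; omega
            rw [← hg]; exact List.getElem_mem hj2
          rw [← heq]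
          exact List.mem_map_of_mem hjmem

-- one copy of v moves the state from stateS j to stateS (j+1)
lemma astep_stateS (st : List (List Int)) (v : Int) (j : Nat)
    (hnd : st.Nodup) (hv : ∀ t ∈ st, v ∉ t) :
    innerLoop v (stateS st v j).length 0 (stateS st v j) = stateS st v (j + 1) := by
  set P : List (List Int) := (List.range j).flatMap (blockS st v) with hP
  have hsplit : stateS st v j = P ++ blockS st v j := by
    simp [stateS, hP, List.range_succ]
  have hmemP : ∀ x ∈ P, ∃ k < j, ∃ t ∈ st, x = t ++ List.replicate k v := by
    intro x hx
    simp only [hP, List.mem_flatMap, List.mem_range] at hx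
    rcases hx with ⟨k, hk, hx⟩
    exact ⟨k, hk, mem_blockS.mp hx⟩
  have hPlen : P.length ≤ (stateS st v j).length := by
    rw [hsplit]; simp
  have hblockmap : (blockS st v j).map (· ++ [v]) = blockS st v (j + 1) := by
    simp [blockS, List.map_map, Function.comp_def, List.replicate_succ',
      List.append_assoc]
  have hdropP : (stateS st v j).drop P.length = blockS st v j := by
    rw [hsplit, List.drop_left]
  have hnew : ∀ k, P.length ≤ k → ∀ hk : k < (stateS st v j).length,
      (stateS st v j)[k] ++ [v] ∉ stateS st v j ++ ([] : List (List Int)) := by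
    intro k hkP hk hmem
    simp only [List.append_nil] at hmem
    have hk2 : k - P.length < (blockS st v j).length := by
      have h5 := hk; rw [hsplit] at h5; simp only [List.length_append] at h5; omega
    have hq : (stateS st v j)[k]? = some ((blockS st v j)[k - P.length]'hk2) := by
      rw [hsplit, List.getElem?_append_right (by omega),
        List.getElem?_eq_getElem hk2]
    have hkx : (stateS st v j)[k] ∈ blockS st v j := by
      rw [List.getElem?_eq_getElem hk] at hq
      rw [Option.some_inj.mp hq]
      exact List.getElem_mem hk2
    rcases mem_blockS.mp hkx with ⟨t, ht, hteq⟩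
    have hcount : ((stateS st v j)[k] ++ [v]).count v = j + 1 := by
      rw [hteq]
      simp [List.count_append, List.count_eq_zero.mpr (hv t ht)]
    have h6 := count_le_of_mem_stateS hv hmem
    rw [hcount] at h6; omega
  have hnodup2 : (((stateS st v j).drop P.length).map (· ++ [v])).Nodup := by
    rw [hdropP, hblockmap]
    exact nodup_blockS v (j + 1) hnd
  have hskip : ∀ k, 0 ≤ k → k < P.length → ∀ hk : k < (stateS st v j).length,
      (stateS st v j)[k] ++ [v] ∈ stateS st v j := by
    intro k _ hkP hk
    have hq : (stateS st v j)[k]? = some (P[k]'hkP) := by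
      rw [hsplit, List.getElem?_append_left hkP, List.getElem?_eq_getElem hkP]
    have hkx : (stateS st v j)[k] ∈ P := by
      rw [List.getElem?_eq_getElem hk] at hq
      rw [Option.some_inj.mp hq]
      exact List.getElem_mem hkP
    rcases hmemP _ hkx with ⟨m, hm, t, ht, hteq⟩
    rw [hteq]
    apply mem_stateS.mpr
    exact ⟨m + 1, by omega, t, ht, by simp [List.replicate_succ', List.append_assoc]⟩
  rw [innerLoop_skip v (stateS st v j) 0 P.length (Nat.zero_le _) hPlen hskip]
  have happ := innerLoop_append v (stateS st v j) [] P.length hnew hnodup2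
  simp only [List.append_nil] at happ
  rw [happ, hdropP, hblockmap, stateS_succ]

-- processing a whole run of c copies of v
lemma run_stateS (st : List (List Int)) (v : Int) (c : Nat)
    (hnd : st.Nodup) (hv : ∀ t ∈ st, v ∉ t) :
    (List.replicate c v).foldl (fun sets num => innerLoop num sets.length 0 sets) st
      = stateS st v c := by
  suffices h : ∀ m j, (List.replicate m v).foldl
      (fun sets num => innerLoop num sets.length 0 sets) (stateS st v j)
      = stateS st v (j + m) by
    have := h c 0
    rwa [stateS_zero, Nat.zero_add] at this
  intro m
  induction m with
  | zero => intro j; simp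
  | succ m ih =>
    intro j
    rw [List.replicate_succ, List.foldl_cons, astep_stateS st v j hnd hv, ih (j + 1)]
    congr 1
    omega

-- B's per-run rebuild produces exactly stateS
lemma bstep_stateS (st : List (List Int)) (v : Int) (c : Nat) :
    (PySem.List.pyRange 0 ((c : Int) + 1) 1).foldl
      (fun acc k => acc ++ st.map (fun sub => sub ++ List.replicate k.toNat v)) []
      = stateS st v c := by
  have h1 : ((c : Int) + 1) = ((c + 1 : Nat) : Int) := by push_cast; ring
  rw [h1, PySem.List.pyRange_zero_natCast]
  rw [PySem.List.foldl_append_eq_flatMap]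
  simp only [List.nil_append, List.flatMap_map]
  unfold stateS blockS
  congr 1

-- every element of every subset in stateS is an old element or v
lemma mem_mem_stateS {st : List (List Int)} {v y : Int} {j : Nat} {x : List Int}
    (hx : x ∈ stateS st v j) (hy : y ∈ x) : (∃ t ∈ st, y ∈ t) ∨ y = v := by
  rcases mem_stateS.mp hx with ⟨k, _, t, ht, rfl⟩
  rcases List.mem_append.mp hy with h | h
  · exact Or.inl ⟨t, ht, h⟩
  · exact Or.inr (List.eq_of_mem_replicate h)

-- glue: the head of a dropWhile residue fails the predicate
lemma head_dropWhile_false {p : Int → Bool} {l : List Int} {h : Int} {d' : List Int}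
    (he : l.dropWhile p = h :: d') : p h = false := by
  have hne : l.dropWhile p ≠ [] := by simp [he]
  have h2 := List.head_dropWhile_not p hne
  simpa [he] using h2

-- main induction: on a sorted list, A's fold equals B's run-by-run rebuild
lemma main_loop (l : List Int) (st : List (List Int))
    (hsort : l.Pairwise (· ≤ ·)) (hnd : st.Nodup)
    (hlt : ∀ x ∈ st, ∀ y ∈ x, ∀ z ∈ l, y < z) :
    l.foldl (fun sets num => innerLoop num sets.length 0 sets) st = altGo st l := by
  induction hn : l.length using Nat.strong_induction_on generalizing l st with
  | _ n ih =>
  match l with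
  | [] => rw [altGo]; simp
  | v :: rest =>
    rw [altGo]
    set t := rest.takeWhile (· == v) with hT
    set d := rest.dropWhile (· == v) with hD
    have hrest : rest = t ++ d := (List.takeWhile_append_dropWhile).symm
    have htrep : t = List.replicate t.length v := by
      apply List.eq_replicate_of_mem
      intro b hb
      have := List.mem_takeWhile_imp hb
      simpa using this
    have hc : v :: rest = List.replicate (1 + t.length) v ++ d := by
      conv_lhs => rw [hrest, htrep]
      rw [Nat.add_comm, List.replicate_succ]
      simp
    have hvnotin : ∀ x ∈ st, v ∉ x := by
      intro x hx hvx
      exact lt_irrefl v (hlt x hx v hvx v (List.mem_cons_self))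
    -- LHS: split the fold at the run boundary
    conv_lhs => rw [hc, List.foldl_append]
    rw [run_stateS st v (1 + t.length) hnd hvnotin]
    -- RHS: the rebuilt result is the same state
    rw [bstep_stateS st v (1 + t.length)]
    -- facts about d for the induction hypothesis
    have hdsub : d.Sublist rest := List.dropWhile_sublist _
    have hvle : ∀ z ∈ rest, v ≤ z := by
      intro z hz
      exact (List.pairwise_cons.mp hsort).1 z hz
    have hvd : ∀ z ∈ d, v < z := by
      intro z hz
      obtain ⟨h, d', hdd⟩ : ∃ h d', d = h :: d' := by
        cases hd : d with
        | nil => rw [hd] at hz; simp at hz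
        | cons a b => exact ⟨a, b, rfl⟩
      have hdw : rest.dropWhile (· == v) = h :: d' := by rw [← hD, hdd]
      have hh : (h == v) = false := head_dropWhile_false (p := (· == v)) hdw
      have hhne : h ≠ v := by simpa using hh
      have hmemh : h ∈ rest := hdsub.subset (by rw [hdd]; exact List.mem_cons_self)
      have hhv : v < h := lt_of_le_of_ne (hvle h hmemh) (Ne.symm hhne)
      rcases List.mem_cons.mp (by rw [← hdd]; exact hz) with rfl | hz'
      · exact hhv
      · have hpd : d.Pairwise (· ≤ ·) :=
          ((List.pairwise_cons.mp hsort).2).sublist hdsub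
        rw [hdd] at hpd
        exact lt_of_lt_of_le hhv ((List.pairwise_cons.mp hpd).1 z hz')
    refine ih d.length ?_ d (stateS st v (1 + t.length)) ?_ ?_ ?_ rfl
    · have h1 : d.length ≤ rest.length := hdsub.length_le
      simp [← hn]; omega
    · exact ((List.pairwise_cons.mp hsort).2).sublist hdsub
    · exact nodup_stateS _ hnd hvnotin
    · intro x hx y hy z hz
      rcases mem_mem_stateS hx hy with ⟨tt, htt, hytt⟩ | rfl
      · exact hlt tt htt y hytt z (List.mem_cons_of_mem _ (hdsub.subset hz))
      · exact hvd z hz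

-- ===== VERDICT (by name: the statement is the Claim_ definition above) =====
theorem makeSets_spec : Claim_equal_makeSets := by
  intro arr _
  unfold Spec_makeSets makeSets makeSets_alt
  apply main_loop
  · exact PySem.List.sorted_pairwise arr (fun x => x) 
  · exact List.nodup_singleton _
  · intro x hx y hy z _
    simp at hx
    subst hx
    simp at hy
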